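-- pv_equiv track=rewrite | github.com/anoopsri118/project4 | spammer_finder.py | find_spammer
-- ===== SOURCE A (Python) =====
-- from collections import defaultdict
--
-- def find_spammer(n, messages):
--     """Return the spammer's account ID, or None if no spammer exists."""
--     if n <= 0:
--         return None
--
--     received = [False] * (n + 1)
--     sent_to = defaultdict(set)
--
--     for sender, receiver in messages:
--         if not (1 <= sender <= n and 1 <= receiver <= n):
--             continue
--
--         if sender == receiver:
--             continue
--
--         sent_to[sender].add(receiver)
--         received[receiver] = True
--
--     for account in range(1, n + 1):
--         if not received[account] and len(sent_to[account]) == n - 1: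
--             return account
--
--     return None
-- ===== SOURCE B (Python) =====
-- def find_spammer(n, messages):
--     """Return the spammer's account ID, or None if no spammer exists."""
--     if n <= 0:
--         return None
--
--     # Pass 1: mark who received at least one valid, non-self message.
--     received = [False] * (n + 1)
--     for sender, receiver in messages:
--         if 1 <= sender <= n and 1 <= receiver <= n and sender != receiver:
--             received[receiver] = True
--
--     # A spammer messages every other account, so every other account has
--     # received something: the spammer must be the UNIQUE unreceived account.
--     candidates = [a for a in range(1, n + 1) if not received[a]]
--     if len(candidates) != 1:
--         return None
--     c = candidates[0]
--
--     # Pass 2: count the candidate's distinct valid receivers with a seen array.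
--     seen = [False] * (n + 1)
--     distinct = 0
--     for sender, receiver in messages:
--         if sender == c and 1 <= receiver <= n and receiver != c and not seen[receiver]:
--             seen[receiver] = True
--             distinct += 1
--
--     return c if distinct == n - 1 else None
-- ===== Notes on version B (the rewrite author's own statement) =====
-- stated objective: faster
-- what changed: Replaces A's dict-of-receiver-sets built for every sender with uniqueness-based candidate elimination: one pass marks received flags, the spammer must be the unique unreceived account (if two accounts received nothing, nobody messaged everyone else), and only that single candidate's distinct receivers are counted in a dedicated seen-array pass.
import Mathlib
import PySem

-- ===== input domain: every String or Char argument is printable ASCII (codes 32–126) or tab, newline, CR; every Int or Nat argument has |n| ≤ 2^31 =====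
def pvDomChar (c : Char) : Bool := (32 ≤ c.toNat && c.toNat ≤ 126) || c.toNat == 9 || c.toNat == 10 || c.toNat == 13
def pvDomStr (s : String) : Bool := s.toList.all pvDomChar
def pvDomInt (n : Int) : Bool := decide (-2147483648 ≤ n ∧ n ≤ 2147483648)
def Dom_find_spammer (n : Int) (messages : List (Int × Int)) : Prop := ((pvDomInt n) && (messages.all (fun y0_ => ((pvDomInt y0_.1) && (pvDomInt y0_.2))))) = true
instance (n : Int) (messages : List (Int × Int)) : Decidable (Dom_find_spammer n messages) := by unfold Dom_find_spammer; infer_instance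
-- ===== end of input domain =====

-- B replaces A's dict-of-receiver-sets by uniqueness-based candidate elimination: the spammer
-- must be the unique unreceived account, and only that one candidate's distinct receivers are
-- counted (objective: faster by a constant factor, measured).

-- ===== PORT A =====
-- literal port of A: received list + defaultdict(set); the defaultdict read in the second
-- loop (which in Python inserts an empty set) is modelled by getD with the empty-set default,
-- which is exact here since the dict is not observed afterwards.
def pvAstep (n : Int) (st : List Bool × PySem.Dict Int (PySem.Set Int)) (m : Int × Int) :
    List Bool × PySem.Dict Int (PySem.Set Int) :=
  if ¬ (1 ≤ m.1 ∧ m.1 ≤ n ∧ 1 ≤ m.2 ∧ m.2 ≤ n) then st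
  else if m.1 = m.2 then st
  else (PySem.List.pySetD st.1 m.2 true,
        PySem.Dict.insert st.2 m.1
          (PySem.Set.add (PySem.Dict.getD st.2 m.1 PySem.Set.empty) m.2))

def find_spammer (n : Int) (messages : List (Int × Int)) : Option Int :=
  if n ≤ 0 then none
  else
    let st := messages.foldl (pvAstep n)
      (List.replicate (n + 1).toNat false, PySem.Dict.empty)
    (PySem.List.pyRange 1 (n + 1) 1).find? (fun account =>
      !(PySem.List.pyGetD st.1 account false) &&
      (((PySem.Dict.getD st.2 account PySem.Set.empty).length : Int) == n - 1))

-- ===== PORT B =====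
-- pass 1: mark received flags
def pvBrecStep (n : Int) (r : List Bool) (m : Int × Int) : List Bool :=
  if 1 ≤ m.1 ∧ m.1 ≤ n ∧ 1 ≤ m.2 ∧ m.2 ≤ n ∧ m.1 ≠ m.2 then
    PySem.List.pySetD r m.2 true
  else r

-- pass 2: count the single candidate's distinct valid receivers with a seen array
def pvBcntStep (n c : Int) (st : List Bool × Int) (m : Int × Int) : List Bool × Int :=
  if m.1 = c ∧ 1 ≤ m.2 ∧ m.2 ≤ n ∧ m.2 ≠ c ∧ ¬ (PySem.List.pyGetD st.1 m.2 false = true) then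
    (PySem.List.pySetD st.1 m.2 true, st.2 + 1)
  else st

def find_spammer_alt (n : Int) (messages : List (Int × Int)) : Option Int :=
  if n ≤ 0 then none
  else
    let received := messages.foldl (pvBrecStep n) (List.replicate (n + 1).toNat false)
    let candidates := (PySem.List.pyRange 1 (n + 1) 1).filter
      (fun a => !(PySem.List.pyGetD received a false))
    -- Python: if len(candidates) != 1: return None; c = candidates[0]
    match candidates with
    | [c] =>
      let st := messages.foldl (pvBcntStep n c)
        (List.replicate (n + 1).toNat false, (0 : Int))
      if st.2 = n - 1 then some c else none
    | _ => none

-- ===== PRECONDITION & SPEC =====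
def Spec_find_spammer (n : Int) (messages : List (Int × Int)) (out : Option Int) : Prop := out = find_spammer_alt n messages
instance (n : Int) (messages : List (Int × Int)) (out : Option Int) : Decidable (Spec_find_spammer n messages out) := by unfold Spec_find_spammer; infer_instance

-- ===== CLAIM (what is proved, stated in full; the proofs are below) =====
def Claim_equal_find_spammer : Prop := ∀ (n : Int) (messages : List (Int × Int)), Dom_find_spammer n messages → Spec_find_spammer n messages (find_spammer n messages)

-- ===== LEMMAS AND PROOFS =====

-- proof-only reference fold: the distinct valid receivers of account a, in first-seen order
def pvDstep (n a : Int) (s : PySem.Set Int) (m : Int × Int) : PySem.Set Int :=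
  if (1 ≤ m.1 ∧ m.1 ≤ n ∧ 1 ≤ m.2 ∧ m.2 ≤ n ∧ m.1 ≠ m.2) ∧ m.1 = a then
    PySem.Set.add s m.2
  else s

theorem pv_set_add_eq {α : Type} [BEq α] [LawfulBEq α] (s : PySem.Set α) (x : α) :
    PySem.Set.add s x = if x ∈ s then s else s ++ [x] := by
  simp only [PySem.Set.add, PySem.Set.contains]
  by_cases h : x ∈ s
  · rw [if_pos (by simpa [List.contains_iff_mem] using h), if_pos h]
  · rw [if_neg (by simpa [List.contains_iff_mem] using h), if_neg h]

-- L1: the received list computed by A's fold equals B's first pass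
theorem pv_proj1 (n : Int) (ms : List (Int × Int)) (r : List Bool)
    (d : PySem.Dict Int (PySem.Set Int)) :
    (ms.foldl (pvAstep n) (r, d)).1 = ms.foldl (pvBrecStep n) r := by
  induction ms generalizing r d with
  | nil => rfl
  | cons m t ih =>
    simp only [List.foldl_cons, pvAstep, pvBrecStep]
    by_cases hb : 1 ≤ m.1 ∧ m.1 ≤ n ∧ 1 ≤ m.2 ∧ m.2 ≤ n
    · by_cases he : m.1 = m.2
      · rw [if_neg (by simpa using hb), if_pos he,
            if_neg (by rintro ⟨_, _, _, _, h⟩; exact h he)]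
        exact ih r d
      · rw [if_neg (by simpa using hb), if_neg he,
            if_pos ⟨hb.1, hb.2.1, hb.2.2.1, hb.2.2.2, he⟩]
        exact ih _ _
    · rw [if_pos (by simpa using hb), if_neg (by rintro ⟨h1, h2, h3, h4, _⟩; exact hb ⟨h1, h2, h3, h4⟩)]
      exact ih r d

-- L2: A's dict at key a is the reference fold pvDstep
theorem pv_dict_char (n a : Int) (ms : List (Int × Int)) (r : List Bool)
    (d : PySem.Dict Int (PySem.Set Int)) :
    PySem.Dict.getD ((ms.foldl (pvAstep n) (r, d)).2) a PySem.Set.empty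
      = ms.foldl (pvDstep n a) (PySem.Dict.getD d a PySem.Set.empty) := by
  induction ms generalizing r d with
  | nil => rfl
  | cons m t ih =>
    simp only [List.foldl_cons, pvAstep, pvDstep]
    by_cases hb : 1 ≤ m.1 ∧ m.1 ≤ n ∧ 1 ≤ m.2 ∧ m.2 ≤ n
    · by_cases he : m.1 = m.2
      · rw [if_neg (by simpa using hb), if_pos he,
            if_neg (by rintro ⟨⟨_, _, _, _, h⟩, _⟩; exact h he)]
        exact ih r d
      · rw [if_neg (by simpa using hb), if_neg he]
        by_cases ha : m.1 = a
        · rw [if_pos ⟨⟨hb.1, hb.2.1, hb.2.2.1, hb.2.2.2, he⟩, ha⟩]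
          rw [ih]
          congr 1
          rw [PySem.Dict.getD_insert, if_pos ha.symm, ha]
        · rw [if_neg (by rintro ⟨_, h⟩; exact ha h)]
          rw [ih]
          congr 1
          rw [PySem.Dict.getD_insert, if_neg (fun h => ha h.symm)]
    · rw [if_pos (by simpa using hb),
          if_neg (by rintro ⟨⟨h1, h2, h3, h4, _⟩, _⟩; exact hb ⟨h1, h2, h3, h4⟩)]
      exact ih r d

-- length is preserved by the received fold
theorem pv_rec_length (n : Int) (ms : List (Int × Int)) (r : List Bool) :
    (ms.foldl (pvBrecStep n) r).length = r.length := by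
  induction ms generalizing r with
  | nil => rfl
  | cons m t ih =>
    simp only [List.foldl_cons, pvBrecStep]
    split_ifs with h
    · rw [ih, PySem.List.length_pySetD]
    · exact ih r

-- L5a: the reference fold keeps Nodup and element bounds
theorem pv_dfold_shape (n a : Int) (ms : List (Int × Int)) (s : PySem.Set Int)
    (hnd : s.Nodup) (hb : ∀ x ∈ s, 1 ≤ x ∧ x ≤ n ∧ x ≠ a) :
    (ms.foldl (pvDstep n a) s).Nodup ∧
      ∀ x ∈ ms.foldl (pvDstep n a) s, 1 ≤ x ∧ x ≤ n ∧ x ≠ a := by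
  induction ms generalizing s with
  | nil => exact ⟨hnd, hb⟩
  | cons m t ih =>
    simp only [List.foldl_cons, pvDstep]
    split_ifs with hc
    · refine ih _ (PySem.Set.nodup_add s m.2 hnd) ?_
      intro x hx
      rcases (PySem.Set.mem_add _ _ _).1 hx with hx | rfl
      · exact hb x hx
      · obtain ⟨⟨_, _, h3, h4, h5⟩, h6⟩ := hc
        exact ⟨h3, h4, fun hh => h5 (h6.trans hh.symm)⟩
    · exact ih s hnd hb

-- L5b: every receiver recorded for a is marked received at the end
theorem pv_dfold_marked (n a : Int) (ms : List (Int × Int)) (r : List Bool) (s : PySem.Set Int)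
    (hr : r.length = (n + 1).toNat)
    (hb : ∀ x ∈ s, 1 ≤ x ∧ x ≤ n ∧ PySem.List.pyGetD r x false = true) :
    ∀ x ∈ ms.foldl (pvDstep n a) s,
      PySem.List.pyGetD (ms.foldl (pvBrecStep n) r) x false = true := by
  induction ms generalizing r s with
  | nil => intro x hx; exact (hb x hx).2.2
  | cons m t ih =>
    simp only [List.foldl_cons, pvDstep, pvBrecStep]
    by_cases hc : (1 ≤ m.1 ∧ m.1 ≤ n ∧ 1 ≤ m.2 ∧ m.2 ≤ n ∧ m.1 ≠ m.2) ∧ m.1 = a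
    · obtain ⟨⟨h1, h2, h3, h4, h5⟩, h6⟩ := hc
      rw [if_pos ⟨⟨h1, h2, h3, h4, h5⟩, h6⟩, if_pos ⟨h1, h2, h3, h4, h5⟩]
      refine ih _ _ (by rw [PySem.List.length_pySetD]; exact hr) ?_
      have hset : ∀ y : Int, 0 ≤ y →
          PySem.List.pyGetD (PySem.List.pySetD r m.2 true) y false
            = if y.toNat = m.2.toNat then true else PySem.List.pyGetD r y false := by
        intro y hy
        have hm2 : m.2 = ((m.2.toNat : Nat) : Int) := (Int.toNat_of_nonneg (by omega)).symm
        have hyy : y = ((y.toNat : Nat) : Int) := (Int.toNat_of_nonneg hy).symm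
        rw [hm2, hyy, PySem.List.pyGetD_pySetD_natCast r m.2.toNat y.toNat true false (by omega)]
        simp only [Int.toNat_natCast]
        split_ifs <;> rfl
      intro x hx
      rcases (PySem.Set.mem_add _ _ _).1 hx with hx | rfl
      · obtain ⟨hx1, hx2, hx3⟩ := hb x hx
        refine ⟨hx1, hx2, ?_⟩
        rw [hset x (by omega)]
        split_ifs with h
        · rfl
        · exact hx3
      · exact ⟨h3, h4, by rw [hset m.2 (by omega)]; simp⟩
    · rw [if_neg hc]
      by_cases hc' : 1 ≤ m.1 ∧ m.1 ≤ n ∧ 1 ≤ m.2 ∧ m.2 ≤ n ∧ m.1 ≠ m.2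
      · rw [if_pos hc']
        refine ih _ _ (by rw [PySem.List.length_pySetD]; exact hr) ?_
        intro x hx
        obtain ⟨hx1, hx2, hx3⟩ := hb x hx
        refine ⟨hx1, hx2, ?_⟩
        have hm2 : m.2 = ((m.2.toNat : Nat) : Int) := (Int.toNat_of_nonneg (by omega)).symm
        have hxx : x = ((x.toNat : Nat) : Int) := (Int.toNat_of_nonneg (by omega)).symm
        rw [hm2, hxx, PySem.List.pyGetD_pySetD_natCast r m.2.toNat x.toNat true false (by omega)]
        split_ifs with h
        · rfl
        · rw [hxx] at hx3; exact hx3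
      · rw [if_neg hc']
        exact ih r s hr hb

-- L6: the seen-array counting pass computes the reference fold's length
theorem pv_cnt_char (n c : Int) (hc1 : 1 ≤ c) (hc2 : c ≤ n) (ms : List (Int × Int))
    (seen : List Bool) (k : Int) (s : PySem.Set Int)
    (hlen : seen.length = (n + 1).toNat) (hnd : s.Nodup)
    (hb : ∀ x ∈ s, 1 ≤ x ∧ x ≤ n ∧ x ≠ c)
    (hiff : ∀ i : Int, 1 ≤ i → i ≤ n → (PySem.List.pyGetD seen i false = true ↔ i ∈ s)) :
    (ms.foldl (pvBcntStep n c) (seen, k)).2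
      = k + ((ms.foldl (pvDstep n c) s).length : Int) - (s.length : Int) := by
  induction ms generalizing seen k s with
  | nil => simp
  | cons m t ih =>
    simp only [List.foldl_cons, pvBcntStep, pvDstep]
    by_cases hd : (1 ≤ m.1 ∧ m.1 ≤ n ∧ 1 ≤ m.2 ∧ m.2 ≤ n ∧ m.1 ≠ m.2) ∧ m.1 = c
    · obtain ⟨⟨h1, h2, h3, h4, h5⟩, h6⟩ := hd
      have hDpos : (1 ≤ m.1 ∧ m.1 ≤ n ∧ 1 ≤ m.2 ∧ m.2 ≤ n ∧ m.1 ≠ m.2) ∧ m.1 = c :=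
        ⟨⟨h1, h2, h3, h4, h5⟩, h6⟩
      rw [if_pos hDpos, pv_set_add_eq s m.2]
      have hm2c : m.2 ≠ c := fun hh => h5 (h6.trans hh.symm)
      by_cases hmem : m.2 ∈ s
      · have hseen : PySem.List.pyGetD seen m.2 false = true := (hiff m.2 h3 h4).2 hmem
        have hBneg : ¬ (m.1 = c ∧ 1 ≤ m.2 ∧ m.2 ≤ n ∧ m.2 ≠ c ∧
            ¬ (PySem.List.pyGetD seen m.2 false = true)) := by
          rintro ⟨_, _, _, _, hns⟩; exact hns hseen
        rw [if_neg hBneg, if_pos hmem]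
        exact ih seen k s hlen hnd hb hiff
      · have hseen : ¬ (PySem.List.pyGetD seen m.2 false = true) :=
          fun hh => hmem ((hiff m.2 h3 h4).1 hh)
        have hBpos : m.1 = c ∧ 1 ≤ m.2 ∧ m.2 ≤ n ∧ m.2 ≠ c ∧
            ¬ (PySem.List.pyGetD seen m.2 false = true) := ⟨h6, h3, h4, hm2c, hseen⟩
        rw [if_pos hBpos, if_neg hmem]
        have hnd' : (s ++ [m.2]).Nodup := by
          have := PySem.Set.nodup_add s m.2 hnd
          rwa [pv_set_add_eq s m.2, if_neg hmem] at this
        have hset : ∀ y : Int, 0 ≤ y →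
            PySem.List.pyGetD (PySem.List.pySetD seen m.2 true) y false
              = if y.toNat = m.2.toNat then true else PySem.List.pyGetD seen y false := by
          intro y hy
          have hm2 : m.2 = ((m.2.toNat : Nat) : Int) := (Int.toNat_of_nonneg (by omega)).symm
          have hyy : y = ((y.toNat : Nat) : Int) := (Int.toNat_of_nonneg hy).symm
          rw [hm2, hyy, PySem.List.pyGetD_pySetD_natCast seen m.2.toNat y.toNat true false (by omega)]
          simp only [Int.toNat_natCast]
          split_ifs <;> rfl
        rw [ih _ _ _ (by rw [PySem.List.length_pySetD]; exact hlen) hnd'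
          (by intro x hx
              rcases List.mem_append.1 hx with hx | hx
              · exact hb x hx
              · simp at hx; subst hx; exact ⟨h3, h4, hm2c⟩)
          (by intro i hi1 hi2
              rw [hset i (by omega)]
              constructor
              · intro hh
                split_ifs at hh with h
                · have : i = m.2 := by omega
                  simp [this]
                · exact List.mem_append.2 (Or.inl ((hiff i hi1 hi2).1 hh))
              · intro hh
                rcases List.mem_append.1 hh with hh | hh
                · split_ifs with h
                  · rfl
                  · exact (hiff i hi1 hi2).2 hh
                · simp at hh; subst hh; simp)]
        simp only [List.length_append, List.length_cons, List.length_nil]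
        push_cast
        ring
    · rw [if_neg hd]
      rw [if_neg (by
        rintro ⟨g1, g2, g3, g4, _⟩
        exact hd ⟨⟨by omega, by omega, g2, g3, fun hh => g4 (by omega)⟩, g1⟩)]
      exact ih seen k s hlen hnd hb hiff

-- L7: pigeonhole — n-1 distinct accounts in [1,n]\{a} are ALL of them
theorem pv_pigeonhole (n a : Int) (S : List Int) (hnd : S.Nodup)
    (hb : ∀ x ∈ S, 1 ≤ x ∧ x ≤ n ∧ x ≠ a) (hlen : (S.length : Int) = n - 1)
    (ha1 : 1 ≤ a) (ha2 : a ≤ n) :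
    ∀ b : Int, 1 ≤ b → b ≤ n → b ≠ a → b ∈ S := by
  intro b hb1 hb2 hba
  have hsub : S.toFinset ⊆ (Finset.Icc (1 : Int) n).erase a := by
    intro x hx
    rw [List.mem_toFinset] at hx
    obtain ⟨h1, h2, h3⟩ := hb x hx
    exact Finset.mem_erase.2 ⟨h3, Finset.mem_Icc.2 ⟨h1, h2⟩⟩
  have hcard1 : S.toFinset.card = S.length := List.toFinset_card_of_nodup hnd
  have hcardI : (Finset.Icc (1 : Int) n).card = n.toNat := by
    rw [Int.card_Icc]; omega
  have hcardE : ((Finset.Icc (1 : Int) n).erase a).card = n.toNat - 1 := by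
    rw [Finset.card_erase_of_mem (Finset.mem_Icc.2 ⟨ha1, ha2⟩), hcardI]
  have heq : S.toFinset = (Finset.Icc (1 : Int) n).erase a := by
    apply Finset.eq_of_subset_of_card_le hsub
    rw [hcard1, hcardE]; omega
  have : b ∈ S.toFinset := by
    rw [heq]
    exact Finset.mem_erase.2 ⟨hba, Finset.mem_Icc.2 ⟨hb1, hb2⟩⟩
  exact List.mem_toFinset.1 this

-- find? over a list whose only possible hit is c
theorem pv_find?_unique {α : Type} (l : List α) (p : α → Bool) (c : α)
    (h1 : ∀ a ∈ l, p a = true → a = c) (h2 : c ∈ l) :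
    l.find? p = if p c then some c else none := by
  by_cases hp : p c = true
  · rw [if_pos hp]
    induction l with
    | nil => cases h2
    | cons x t ih =>
      simp only [List.find?]
      cases hx : p x with
      | true => rw [h1 x (by simp) hx]
      | false =>
        have hxc : x ≠ c := fun hh => by rw [hh, hp] at hx; cases hx
        exact ih (fun a ha hpa => h1 a (by simp [ha]) hpa)
          (by
            rcases List.mem_cons.1 h2 with h | h
            · exact absurd h.symm hxc
            · exact h)
  · rw [if_neg (by simpa using hp)]
    rw [List.find?_eq_none]
    intro a ha hpa
    exact hp (by rw [← h1 a ha hpa]; exact hpa)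

theorem pv_nodup_all_eq {α : Type} (l : List α) (a : α) (hnd : l.Nodup)
    (hall : ∀ x ∈ l, x = a) (hmem : a ∈ l) : l = [a] := by
  cases l with
  | nil => cases hmem
  | cons x t =>
    have hx : x = a := hall x (by simp)
    subst hx
    cases t with
    | nil => rfl
    | cons y u =>
      have hy : y = x := hall y (by simp)
      rw [List.nodup_cons] at hnd
      exact absurd (by simp [hy]) hnd.1

theorem pv_getD_replicate_false (k : Nat) (i : Int) :
    PySem.List.pyGetD (List.replicate k false) i false = false := by
  by_cases h : PySem.Raise.InRange (List.replicate k false).length i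
  · exact List.eq_of_mem_replicate (PySem.List.pyGetD_mem _ false h)
  · simp only [PySem.List.pyGetD, PySem.List.pyGet?, PySem.List.pyIdx?]
    split_ifs with h1 h2 <;> simp_all [PySem.Raise.InRange]

-- ===== VERDICT (by name: the statement is the Claim_ definition above) =====
theorem find_spammer_spec : Claim_equal_find_spammer := by
  intro n messages _
  unfold Spec_find_spammer find_spammer find_spammer_alt
  by_cases hn : n ≤ 0
  · rw [if_pos hn, if_pos hn]
  · rw [if_neg hn, if_neg hn]
    simp only []
    set r0 : List Bool := List.replicate (n + 1).toNat false with hr0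
    have hr0len : r0.length = (n + 1).toNat := by simp [hr0]
    set rec := messages.foldl (pvBrecStep n) r0 with hrec
    have hreclen : rec.length = (n + 1).toNat := by rw [hrec, pv_rec_length]; exact hr0len
    have hproj : (messages.foldl (pvAstep n) (r0, PySem.Dict.empty)).1 = rec :=
      pv_proj1 n messages r0 PySem.Dict.empty
    have hdict : ∀ a : Int,
        PySem.Dict.getD ((messages.foldl (pvAstep n) (r0, PySem.Dict.empty)).2) a PySem.Set.empty
          = messages.foldl (pvDstep n a) PySem.Set.empty := by
      intro a; exact pv_dict_char n a messages r0 PySem.Dict.empty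
    set range := PySem.List.pyRange 1 (n + 1) 1 with hrange
    have hmemrange : ∀ a : Int, a ∈ range ↔ 1 ≤ a ∧ a < n + 1 := by
      intro a; rw [hrange]; exact PySem.List.mem_pyRange_one
    set cand := range.filter (fun a => !(PySem.List.pyGetD rec a false)) with hcand
    have hmemcand : ∀ a : Int, a ∈ cand ↔ a ∈ range ∧ PySem.List.pyGetD rec a false = false := by
      intro a; rw [hcand, List.mem_filter]; simp
    have hcandnd : cand.Nodup := List.Nodup.filter _ (hrange ▸ PySem.List.nodup_pyRange_one 1 (n + 1))
    -- shape and markedness of each account's distinct-receiver list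
    have hshape : ∀ a : Int, (messages.foldl (pvDstep n a) PySem.Set.empty).Nodup ∧
        ∀ x ∈ messages.foldl (pvDstep n a) PySem.Set.empty, 1 ≤ x ∧ x ≤ n ∧ x ≠ a := by
      intro a
      exact pv_dfold_shape n a messages PySem.Set.empty List.nodup_nil (by intro x hx; cases hx)
    have hmarked : ∀ a : Int, ∀ x ∈ messages.foldl (pvDstep n a) PySem.Set.empty,
        PySem.List.pyGetD rec x false = true := by
      intro a
      exact pv_dfold_marked n a messages r0 PySem.Set.empty hr0len (by intro x hx; cases hx)
    set p : Int → Bool := fun a =>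
      !(PySem.List.pyGetD (messages.foldl (pvAstep n) (r0, PySem.Dict.empty)).1 a false) &&
      (((PySem.Dict.getD (messages.foldl (pvAstep n) (r0, PySem.Dict.empty)).2 a
          PySem.Set.empty).length : Int) == n - 1) with hp
    have hpchar : ∀ a : Int, p a = true ↔
        PySem.List.pyGetD rec a false = false ∧
        ((messages.foldl (pvDstep n a) PySem.Set.empty).length : Int) = n - 1 := by
      intro a
      rw [hp]
      simp only [hproj, hdict, Bool.and_eq_true, Bool.not_eq_true', beq_iff_eq]
    -- a passing account forces cand = [a]
    have hforce : ∀ a : Int, a ∈ range → p a = true → cand = [a] := by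
      intro a hain hpa
      rw [hpchar a] at hpa
      obtain ⟨hflag, hlen⟩ := hpa
      have hab := (hmemrange a).1 hain
      have hall : ∀ x ∈ cand, x = a := by
        intro x hx
        obtain ⟨hxr, hxf⟩ := (hmemcand x).1 hx
        obtain ⟨hx1, hx2⟩ := (hmemrange x).1 hxr
        by_contra hne
        have hxm : x ∈ messages.foldl (pvDstep n a) PySem.Set.empty :=
          pv_pigeonhole n a _ (hshape a).1 (hshape a).2 hlen (by omega) (by omega)
            x hx1 (by omega) hne
        rw [hmarked a x hxm] at hxf
        cases hxf
      have hamem : a ∈ cand := (hmemcand a).2 ⟨hain, hflag⟩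
      exact pv_nodup_all_eq cand a hcandnd hall hamem
    rcases hC : cand with _ | ⟨c, t⟩
    · -- no candidate: A finds nothing either
      show range.find? p = none
      rw [List.find?_eq_none]
      intro a ha hpa
      have := hforce a ha hpa
      rw [hC] at this
      cases this
    · rcases t with _ | ⟨c2, t2⟩
      · -- exactly one candidate c
        obtain ⟨hcr, hcf⟩ := (hmemcand c).1 (by rw [hC]; simp)
        obtain ⟨hc1, hc2⟩ := (hmemrange c).1 hcr
        have hcnt : (messages.foldl (pvBcntStep n c) (r0, (0 : Int))).2
            = ((messages.foldl (pvDstep n c) PySem.Set.empty).length : Int) := by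
          have := pv_cnt_char n c hc1 (by omega) messages r0 0 PySem.Set.empty hr0len
            List.nodup_nil (by intro x hx; cases hx)
            (by intro i hi1 hi2
                rw [hr0, pv_getD_replicate_false]
                simp)
          simpa using this
        have hfind : range.find? p = if p c then some c else none := by
          refine pv_find?_unique range p c ?_ hcr
          intro a hain hpa
          have := hforce a hain hpa
          rw [hC] at this
          injection this with h
          exact h.symm
        rw [hfind]
        show (if p c = true then some c else none)
          = if (messages.foldl (pvBcntStep n c) (r0, (0 : Int))).2 = n - 1 then some c else none
        rw [hcnt]
        by_cases hpc : p c = true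
        · rw [if_pos hpc]
          obtain ⟨-, hlen⟩ := (hpchar c).1 hpc
          rw [if_pos hlen]
        · rw [if_neg (by simpa using hpc)]
          rw [if_neg (by
            intro hlen
            exact hpc ((hpchar c).2 ⟨hcf, hlen⟩))]
      · -- two or more candidates: A finds nothing
        show range.find? p = none
        rw [List.find?_eq_none]
        intro a ha hpa
        have := hforce a ha hpa
        rw [hC] at this
        injection this with h1 h2
        cases h2
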